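-- pv_equiv track=rewrite | github.com/uw-pluverse/thalia-type | summarize_table.py | array_to_latex_table
-- ===== SOURCE A (Python) =====
-- from typing import List, Any, Dict, Union
--
-- def escape_latex_special_chars(text):
--     # Mapping of special LaTeX characters to their escaped versions
--     latex_special_chars = {
--         '&': r'\&',
--         '%': r'\%',
--         '#': r'\#',
--         '_': r'\_',
--         '~': r'\textasciitilde{}',
--         '^': r'\textasciicircum{}',
--     }
--
--     # Replace each special character with its escaped version
--     for char, escaped_char in latex_special_chars.items():
--         text = text.replace(char, escaped_char)
--
--     return text
--
-- def array_to_latex_table(rows: List[List[str]], column_layout: str) -> str: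
--     # Create the LaTeX table header
--     latex_table = "\\begin{tabular}{" + column_layout + "}\n"
--
--     # Add top border
--     latex_table += "\\toprule\n"
--
--     # Iterate through each row and add to the table
--     for row in rows:
--         if isinstance(row, list):
--             # Escape special LaTeX characters for each cell in the row
--             escaped_row = [escape_latex_special_chars(cell) for cell in row]
--             latex_table += " & ".join(escaped_row) + " \\\\\n"
--             continue
--         if isinstance(row, str):
--             latex_table += f"{row}\n"
--             continue
--         raise Exception(f'Row is not a list or string {row}')
--
--     latex_table += "\\bottomrule\n"
--
--     # Add the LaTeX table footer
--     latex_table += "\\end{tabular}"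
--
--     return latex_table
-- ===== SOURCE B (Python) =====
-- LATEX_SPECIAL_CHARS = {
--     '&': r'\&',
--     '%': r'\%',
--     '#': r'\#',
--     '_': r'\_',
--     '~': r'\textasciitilde{}',
--     '^': r'\textasciicircum{}',
-- }
--
-- def escape_latex_special_chars(text):
--     # one pass: per-character dict lookup instead of six full-string replaces
--     return ''.join(LATEX_SPECIAL_CHARS.get(ch, ch) for ch in text)
--
-- def array_to_latex_table(rows, column_layout):
--     lines = ["\\begin{tabular}{" + column_layout + "}", "\\toprule"]
--     for row in rows:
--         if isinstance(row, list):
--             lines.append(" & ".join(escape_latex_special_chars(cell) for cell in row) + " \\\\")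
--             continue
--         if isinstance(row, str):
--             lines.append(row)
--             continue
--         raise Exception(f'Row is not a list or string {row}')
--     lines.append("\\bottomrule")
--     return "\n".join(lines) + "\n\\end{tabular}"
-- ===== Notes on version B (the rewrite author's own statement) =====
-- stated objective: idiomatic
-- what changed: Escaping is done in one pass over the string with a per-character dict lookup instead of six sequential full-string str.replace scans, and the table is assembled by collecting lines in a list and joining them with '\n' instead of repeated string concatenation.
import Mathlib
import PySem

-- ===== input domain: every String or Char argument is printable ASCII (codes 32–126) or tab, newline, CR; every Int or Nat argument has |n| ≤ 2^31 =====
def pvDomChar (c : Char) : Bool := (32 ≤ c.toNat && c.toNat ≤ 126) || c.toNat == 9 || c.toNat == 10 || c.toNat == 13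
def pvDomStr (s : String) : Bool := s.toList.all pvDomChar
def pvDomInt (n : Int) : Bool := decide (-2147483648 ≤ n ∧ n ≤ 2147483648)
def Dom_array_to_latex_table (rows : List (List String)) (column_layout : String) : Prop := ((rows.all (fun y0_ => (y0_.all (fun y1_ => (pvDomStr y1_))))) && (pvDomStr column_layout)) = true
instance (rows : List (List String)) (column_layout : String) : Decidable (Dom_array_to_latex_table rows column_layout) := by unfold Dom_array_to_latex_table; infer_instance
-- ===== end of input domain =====

-- B rewrites the escaping as ONE character pass with a per-character lookup (instead of six
-- sequential str.replace scans) and assembles the table by collecting lines and joining them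
-- with "\n" (instead of repeated string concatenation); objective: idiomatic.
-- Under the type convention rows : List (List String), so A's `isinstance(row, str)` branch and
-- the `raise` branch are unreachable and both ports omit them.

-- ===== PORT A =====
-- escape_latex_special_chars: the dict items in insertion order, each applied as a full replace pass
def pvEscapeA (text : String) : String :=
  [("&", "\\&"), ("%", "\\%"), ("#", "\\#"), ("_", "\\_"),
   ("~", "\\textasciitilde{}"), ("^", "\\textasciicircum{}")].foldl
    (fun t p => PySem.Str.replace t p.1 p.2) text

def array_to_latex_table (rows : List (List String)) (column_layout : String) : String :=
  let t0 := "\\begin{tabular}{" ++ column_layout ++ "}\n"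
  let t1 := t0 ++ "\\toprule\n"
  let t2 := rows.foldl
    (fun acc row => acc ++ PySem.Str.join " & " (row.map pvEscapeA) ++ " \\\\\n") t1
  let t3 := t2 ++ "\\bottomrule\n"
  t3 ++ "\\end{tabular}"

-- ===== PORT B =====
-- LATEX_SPECIAL_CHARS.get(ch, ch): per-character lookup in the literal dict (default: the char itself)
def pvEscMap (ch : Char) : List Char :=
  if ch = '&' then "\\&".toList
  else if ch = '%' then "\\%".toList
  else if ch = '#' then "\\#".toList
  else if ch = '_' then "\\_".toList
  else if ch = '~' then "\\textasciitilde{}".toList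
  else if ch = '^' then "\\textasciicircum{}".toList
  else [ch]

-- ''.join(LATEX_SPECIAL_CHARS.get(ch, ch) for ch in text): one pass over the characters
def pvEscapeB (text : String) : String := String.ofList (text.toList.flatMap pvEscMap)

def array_to_latex_table_alt (rows : List (List String)) (column_layout : String) : String :=
  let lines := ["\\begin{tabular}{" ++ column_layout ++ "}", "\\toprule"]
  let lines := rows.foldl
    (fun ls row => ls ++ [PySem.Str.join " & " (row.map pvEscapeB) ++ " \\\\"]) lines
  let lines := lines ++ ["\\bottomrule"]
  PySem.Str.join "\n" lines ++ "\n\\end{tabular}"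

-- ===== PRECONDITION & SPEC =====
def Spec_array_to_latex_table (rows : List (List String)) (column_layout : String) (out : String) : Prop := out = array_to_latex_table_alt rows column_layout
instance (rows : List (List String)) (column_layout : String) (out : String) : Decidable (Spec_array_to_latex_table rows column_layout out) := by unfold Spec_array_to_latex_table; infer_instance

-- ===== CLAIM (what is proved, stated in full; the proofs are below) =====
def Claim_equal_array_to_latex_table : Prop := ∀ (rows : List (List String)) (column_layout : String), Dom_array_to_latex_table rows column_layout → Spec_array_to_latex_table rows column_layout (array_to_latex_table rows column_layout)

-- ===== LEMMAS AND PROOFS =====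

-- Chars.replace with a single-character pattern is a flatMap over the characters
theorem pv_go_single (c : Char) (r : List Char) :
    ∀ (fuel : Nat) (cs acc : List Char), cs.length ≤ fuel →
      PySem.Chars.replace.go [c] r fuel cs acc
        = acc.reverse ++ cs.flatMap (fun ch => if ch = c then r else [ch]) := by
  intro fuel
  induction fuel with
  | zero => intro cs acc h; cases cs with
    | nil => simp [PySem.Chars.replace.go]
    | cons a t => simp at h
  | succ n ih =>
    intro cs acc h
    cases cs with
    | nil => simp [PySem.Chars.replace.go]
    | cons a t =>
      simp only [PySem.Chars.replace.go]
      by_cases hc : a = c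
      · subst hc
        rw [if_pos (by simp [List.isPrefixOf])]
        rw [ih _ _ (by simpa using Nat.le_of_succ_le_succ h)]
        simp
      · rw [if_neg (by simp [List.isPrefixOf]; exact fun h2 => hc h2.symm)]
        rw [ih _ _ (by simpa using Nat.le_of_succ_le_succ h)]
        simp [hc]

theorem pv_rep_single (cs : List Char) (c : Char) (r : List Char) :
    PySem.Chars.replace cs [c] r = cs.flatMap (fun ch => if ch = c then r else [ch]) := by
  rw [PySem.Chars.replace]
  rw [if_neg (by simp)]
  rw [pv_go_single c r cs.length cs [] le_rfl]
  simp

-- the six sequential replace passes agree with the one-pass character map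
theorem pv_escape_eq (s : String) : pvEscapeA s = pvEscapeB s := by
  rw [← String.toList_inj]
  simp only [pvEscapeA, pvEscapeB, List.foldl, PySem.Str.toList_replace, String.toList_ofList]
  rw [show ("&" : String).toList = ['&'] from rfl, show ("%" : String).toList = ['%'] from rfl,
      show ("#" : String).toList = ['#'] from rfl, show ("_" : String).toList = ['_'] from rfl,
      show ("~" : String).toList = ['~'] from rfl, show ("^" : String).toList = ['^'] from rfl]
  rw [pv_rep_single, pv_rep_single, pv_rep_single, pv_rep_single, pv_rep_single, pv_rep_single]
  simp only [List.flatMap_assoc]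
  refine congrArg (fun f => List.flatMap f s.toList) (funext fun ch => ?_)
  by_cases h1 : ch = '&'; · subst h1; decide
  by_cases h2 : ch = '%'; · subst h2; decide
  by_cases h3 : ch = '#'; · subst h3; decide
  by_cases h4 : ch = '_'; · subst h4; decide
  by_cases h5 : ch = '~'; · subst h5; decide
  by_cases h6 : ch = '^'; · subst h6; decide
  simp [pvEscMap, h1, h2, h3, h4, h5, h6]

-- A's accumulation loop, on the character level
theorem pv_foldl_str (g : List String → String) (rows : List (List String)) :
    ∀ t : String,
      (rows.foldl (fun acc row => acc ++ g row ++ " \\\\\n") t).toList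
        = t.toList ++ rows.flatMap (fun row => (g row).toList ++ " \\\\\n".toList) := by
  induction rows with
  | nil => simp
  | cons r rs ih =>
    intro t
    simp only [List.foldl_cons, List.flatMap_cons, ih]
    simp [List.append_assoc]

-- join with "\n" of lines ++ [last]
theorem pv_join_snoc (M : List (List Char)) (last : List Char) :
    PySem.Chars.join ['\n'] (M ++ [last])
      = M.flatMap (fun l => l ++ ['\n']) ++ last := by
  induction M with
  | nil => simp [PySem.Chars.join_singleton]
  | cons a m ih =>
    cases hm : m ++ [last] with
    | nil => simp at hm
    | cons b l =>
      rw [List.cons_append, hm, PySem.Chars.join_cons_cons, ← hm, ih]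
      simp [List.append_assoc]

-- ===== VERDICT (by name: the statement is the Claim_ definition above) =====
theorem array_to_latex_table_spec : Claim_equal_array_to_latex_table := by
  intro rows column_layout _
  unfold Spec_array_to_latex_table
  unfold array_to_latex_table array_to_latex_table_alt
  dsimp only
  rw [PySem.List.foldl_append_singleton_eq_map]
  rw [← String.toList_inj]
  simp only [String.toList_append]
  rw [pv_foldl_str (fun row => PySem.Str.join " & " (row.map pvEscapeA)) rows]
  simp only [PySem.Str.toList_join, List.map_append, List.map_cons, List.map_nil]
  rw [show ("\n" : String).toList = ['\n'] from rfl]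
  rw [show ∀ (A B C : List Char) (X : List (List Char)), ([A, B] ++ X ++ [C] : List (List Char)) = ([A, B] ++ X) ++ [C] from fun A B C X => by simp]
  rw [pv_join_snoc]
  simp only [List.cons_append, List.nil_append, List.flatMap_cons,
    List.flatMap_map, String.toList_append]
  have hbody : rows.flatMap
        (fun row => PySem.Chars.join " & ".toList (List.map String.toList (List.map pvEscapeA row))
          ++ " \\\\\n".toList)
      = rows.flatMap
        (fun row => (PySem.Str.join " & " (List.map pvEscapeB row)).toList ++ " \\\\".toList ++ ['\n']) := by
    refine congrArg (fun f => List.flatMap f rows) (funext fun row => ?_)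
    rw [← PySem.Str.toList_join]
    rw [show PySem.Str.join " & " (row.map pvEscapeA) = PySem.Str.join " & " (row.map pvEscapeB) from
      congrArg _ (List.map_congr_left (fun s _ => pv_escape_eq s))]
    simp [List.append_assoc]
  rw [hbody]
  rw [show ("}\n" : String).toList = "}".toList ++ ['\n'] from by decide,
      show ("\\toprule\n" : String).toList = "\\toprule".toList ++ ['\n'] from by decide,
      show ("\n\\end{tabular}" : String).toList = ['\n'] ++ "\\end{tabular}".toList from by decide,
      show ("\\bottomrule\n" : String).toList = "\\bottomrule".toList ++ ['\n'] from by decide]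
  simp [List.append_assoc]
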